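-- pv_equiv track=rewrite | github.com/danrleypereira/craftsmanship-brasilia | mars-rover/UDF11-05-2024/lupo/main.py | countMovementsBeforeDirectionChanges
-- ===== SOURCE A (Python) =====
-- def countMovementsBeforeDirectionChanges(input: str) -> list:
--   input = input.lower();
--   movements = []
--   counter = 0
--   for i in range(len(input)):
--     if input[i] == "r" or input[i] == "l":
--       movements.append(counter)
--       counter = 0
--     else:
--       counter += 1
--   return movements
-- ===== SOURCE B (Python) =====
-- def countMovementsBeforeDirectionChanges(input: str) -> list:
--     parts = input.lower().replace('l', 'r').split('r')
--     return [len(p) for p in parts[:-1]]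
-- ===== Notes on version B (the rewrite author's own statement) =====
-- stated objective: idiomatic
-- what changed: Replaces the index loop with its counter/reset state by a delimit-then-measure one-liner: normalize both direction letters to one delimiter, split on it, and return the lengths of all segments but the last.
import Mathlib
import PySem

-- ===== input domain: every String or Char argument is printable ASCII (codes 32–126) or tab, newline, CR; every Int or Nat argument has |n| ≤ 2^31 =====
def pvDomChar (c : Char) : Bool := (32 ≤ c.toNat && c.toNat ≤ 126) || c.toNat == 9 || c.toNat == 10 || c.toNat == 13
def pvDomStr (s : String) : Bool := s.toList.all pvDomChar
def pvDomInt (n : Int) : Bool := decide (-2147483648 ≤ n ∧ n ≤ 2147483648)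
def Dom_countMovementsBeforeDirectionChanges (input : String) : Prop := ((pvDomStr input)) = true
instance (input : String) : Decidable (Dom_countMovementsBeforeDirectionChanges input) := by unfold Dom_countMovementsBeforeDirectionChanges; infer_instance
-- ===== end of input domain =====

-- B replaces A's counter/reset index loop by delimit-then-measure (normalize 'l' to 'r',
-- split on 'r', return the lengths of all segments but the last); same O(n), idiomatic.

-- ===== PORT A =====
-- the indexed for-loop over the lowered string, carrying (movements, counter)
def countMovementsBeforeDirectionChanges (input : String) : List Int :=
  let inp := PySem.Str.lower input
  (inp.toList.foldl
    (fun (st : List Int × Int) c =>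
      if c == 'r' || c == 'l' then (st.1 ++ [st.2], 0) else (st.1, st.2 + 1))
    ([], 0)).1

-- ===== PORT B =====
-- char-level port of .replace('l','r') (single-char replace = map)
def pvRepl (c : Char) : Char := if c == 'l' then 'r' else c
-- exact char-level port of Python str.split with the one-char separator 'r'
def pvSplitR : List Char → List (List Char)
  | [] => [[]]
  | c :: cs =>
    if c == 'r' then [] :: pvSplitR cs
    else
      match pvSplitR cs with
      | [] => [[c]]
      | p :: ps => (c :: p) :: ps

def countMovementsBeforeDirectionChanges_alt (input : String) : List Int :=
  let parts := pvSplitR ((PySem.Chars.lower input.toList).map pvRepl)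
  parts.dropLast.map (fun p => (p.length : Int))

-- ===== PRECONDITION & SPEC =====
def Spec_countMovementsBeforeDirectionChanges (input : String) (out : List Int) : Prop := out = countMovementsBeforeDirectionChanges_alt input
instance (input : String) (out : List Int) : Decidable (Spec_countMovementsBeforeDirectionChanges input out) := by unfold Spec_countMovementsBeforeDirectionChanges; infer_instance

-- ===== CLAIM (what is proved, stated in full; the proofs are below) =====
def Claim_equal_countMovementsBeforeDirectionChanges : Prop := ∀ (input : String), Dom_countMovementsBeforeDirectionChanges input → Spec_countMovementsBeforeDirectionChanges input (countMovementsBeforeDirectionChanges input)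

-- ===== LEMMAS AND PROOFS =====

-- the list of counts A's loop emits, starting from counter k
def pvSeg : List Char → Int → List Int
  | [], _ => []
  | c :: cs, k => if c == 'r' || c == 'l' then k :: pvSeg cs 0 else pvSeg cs (k + 1)

-- add k to the first element (the initial counter offsets only the first emitted count)
def pvAddK (k : Int) : List Int → List Int
  | [] => []
  | x :: xs => (k + x) :: xs

theorem pvAddK_zero (l : List Int) : pvAddK 0 l = l := by
  cases l <;> simp [pvAddK]

theorem pvSplitR_ne_nil (cs : List Char) : pvSplitR cs ≠ [] := by
  cases cs with
  | nil => simp [pvSplitR]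
  | cons c cs =>
    simp only [pvSplitR]
    split
    · simp
    · cases h : pvSplitR cs <;> simp

theorem foldl_eq_seg (cs : List Char) : ∀ (ms : List Int) (k : Int),
    (cs.foldl
      (fun (st : List Int × Int) c =>
        if c == 'r' || c == 'l' then (st.1 ++ [st.2], 0) else (st.1, st.2 + 1))
      (ms, k)).1 = ms ++ pvSeg cs k := by
  induction cs with
  | nil => intro ms k; simp [pvSeg]
  | cons c cs ih =>
    intro ms k
    rw [List.foldl_cons]
    by_cases h : (c == 'r' || c == 'l') = true
    · rw [if_pos h, ih]
      simp only [pvSeg, h, if_true]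
      simp
    · rw [if_neg h, ih]
      simp only [pvSeg, h, if_false, Bool.false_eq_true]

theorem seg_eq_split (cs : List Char) : ∀ (k : Int),
    pvSeg cs k = pvAddK k ((pvSplitR (cs.map pvRepl)).dropLast.map (fun p => (p.length : Int))) := by
  induction cs with
  | nil => intro k; simp [pvSeg, pvSplitR, pvAddK]
  | cons c cs ih =>
    intro k
    by_cases h : (c == 'r' || c == 'l') = true
    · have hr : pvRepl c = 'r' := by
        rcases Bool.or_eq_true_iff.mp h with h' | h' <;>
          · rw [beq_iff_eq] at h'; simp [pvRepl, h']
      have hne := pvSplitR_ne_nil (cs.map pvRepl)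
      rw [List.map_cons, hr]
      simp only [pvSeg, h, if_true]
      simp only [pvSplitR, BEq.rfl, if_true]
      rw [List.dropLast_cons_of_ne_nil hne, List.map_cons]
      simp only [pvAddK, List.length_nil, Nat.cast_zero, add_zero]
      rw [ih 0, pvAddK_zero]
    · have h2 : ¬ (c == 'r') = true ∧ ¬ (c == 'l') = true := by
        constructor <;> intro hx <;> simp [hx] at h
      have hr : pvRepl c = c := by simp [pvRepl, h2.2]
      rw [List.map_cons, hr]
      simp only [pvSeg, h, if_false, Bool.false_eq_true]
      simp only [pvSplitR, h2.1, if_false, Bool.false_eq_true]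
      cases hsp : pvSplitR (cs.map pvRepl) with
      | nil => exact absurd hsp (pvSplitR_ne_nil _)
      | cons p ps =>
        cases ps with
        | nil =>
          simp [ih (k + 1), hsp, pvAddK]
        | cons q qs =>
          have hne : q :: qs ≠ ([] : List (List Char)) := by simp
          rw [List.dropLast_cons_of_ne_nil hne]
          have hih := ih (k + 1)
          rw [hsp, List.dropLast_cons_of_ne_nil hne] at hih
          simp only [List.map_cons, pvAddK] at hih ⊢
          rw [hih]
          simp [add_comm, add_left_comm]

-- ===== VERDICT (by name: the statement is the Claim_ definition above) =====
theorem countMovementsBeforeDirectionChanges_spec : Claim_equal_countMovementsBeforeDirectionChanges := by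
  intro input _
  unfold Spec_countMovementsBeforeDirectionChanges countMovementsBeforeDirectionChanges countMovementsBeforeDirectionChanges_alt
  simp only [PySem.Str.toList_lower]
  rw [foldl_eq_seg, seg_eq_split, pvAddK_zero]
  simp
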